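-- pv_equiv track=rewrite | github.com/PaulSonOfLars/tgbot | tg_bot/modules/helper_funcs.py | split_quotes
-- ===== SOURCE A (Python) =====
-- def split_quotes(text):
--     if text.startswith('\'') or text.startswith('"'):
--         counter = 1  # ignore first char -> is some kind of quote
--         while counter < len(text):
--             if text[counter] == "\\":
--                 counter += 1
--             elif text[counter] == text[0]:
--                 break
--             counter += 1
--         else:
--             return text.split(None, 1)
--
--         # 1 to avoid starting quote, and counter is exclusive so avoids ending
--         key = remove_escapes(text[1:counter].strip())
--         # index will be in range, or `else` would have been executed and returned
--         rest = text[counter + 1:].strip()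
--         if not key:
--             key = text[0] + text[0]
--         return list(filter(None, [key, rest]))
--     else:
--         return text.split(None, 1)
--
-- def remove_escapes(text):
--     counter = 0
--     res = ""
--     is_escaped = False
--     while counter < len(text):
--         if is_escaped:
--             res += text[counter]
--             is_escaped = False
--         elif text[counter] == "\\":
--             is_escaped = True
--         else:
--             res += text[counter]
--         counter += 1
--     return res
-- ===== SOURCE B (Python) =====
-- def remove_escapes(text):
--     # staged: split on backslash, then rejoin; a nonempty segment after a backslash
--     # contributes itself (its first char was the escaped one), an empty segment means
--     # an escaped backslash (consume the following segment too); a trailing empty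
--     # segment is a dangling backslash and is dropped.
--     segs = text.split("\\")
--     parts = [segs[0]]
--     i = 1
--     while i < len(segs):
--         if segs[i]:
--             parts.append(segs[i])
--             i += 1
--         elif i + 1 < len(segs):
--             parts.append("\\" + segs[i + 1])
--             i += 2
--         else:
--             i += 1
--     return "".join(parts)
--
--
-- def split_quotes(text):
--     if not text or text[0] not in "'\"":
--         return text.split(None, 1)
--     q = text[0]
--     # split the remainder on the quote char: the quote after a segment closes the
--     # string iff that segment ends in an even run of backslashes
--     segs = text[1:].split(q)
--     pos = 1
--     for seg in segs[:-1]: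
--         pos += len(seg)
--         if (len(seg) - len(seg.rstrip("\\"))) % 2 == 0:
--             key = remove_escapes(text[1:pos].strip()) or q + q
--             rest = text[pos + 1:].strip()
--             return [s for s in (key, rest) if s]
--         pos += 1
--     return text.split(None, 1)
-- ===== Notes on version B (the rewrite author's own statement) =====
-- stated objective: alternative
-- what changed: A's stateful character scan (index jumping over escapes to find the closing quote, then a flag-driven unescape loop) is replaced by a staged split-based algorithm: split the remainder on the quote char and take the first segment whose trailing backslash run is even (computed with rstrip), and unescape by splitting on backslash and rejoining the pieces pairwise.
import Mathlib
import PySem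

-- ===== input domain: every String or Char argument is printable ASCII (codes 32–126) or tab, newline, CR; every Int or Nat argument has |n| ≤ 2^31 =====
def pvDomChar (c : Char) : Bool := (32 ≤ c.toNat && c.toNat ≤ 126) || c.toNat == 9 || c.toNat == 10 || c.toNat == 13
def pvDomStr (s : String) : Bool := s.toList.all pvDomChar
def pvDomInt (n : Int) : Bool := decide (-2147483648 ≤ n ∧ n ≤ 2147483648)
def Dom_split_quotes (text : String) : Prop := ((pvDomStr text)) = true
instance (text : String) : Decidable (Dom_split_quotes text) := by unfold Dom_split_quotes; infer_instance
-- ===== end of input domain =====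

-- B replaces A's stateful character scan (index jumps over escapes, then a flag-driven
-- unescape loop) by a staged, split-based algorithm: split on the quote char and test
-- each segment's trailing backslash run for even parity, and unescape by splitting on
-- backslash and rejoining the pieces (objective: alternative; same O(n) cost).

-- ===== PORT A =====
-- A's remove_escapes: a while loop over the characters with an is_escaped flag and a growing result.
def removeEscapesStepA (st : List Char × Bool) (c : Char) : List Char × Bool :=
  if st.2 then (st.1 ++ [c], false)
  else if c = '\\' then (st.1, true)
  else (st.1 ++ [c], false)

def remove_escapes (text : String) : String :=
  String.mk (text.toList.foldl removeEscapesStepA ([], false)).1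

-- A's while loop: at a backslash the counter jumps by 2 (skipping the escaped char);
-- `some counter` = break at the closing quote, `none` = the loop ran off the end (while-else).
def scanA (q : Char) : List Char → Nat → Option Nat
  | [], _ => none
  | c :: cs, counter =>
      if c = '\\' then scanA q (cs.drop 1) (counter + 2)
      else if c = q then some counter
      else scanA q cs (counter + 1)
termination_by cs => cs.length
decreasing_by all_goals (simp; try omega)

def split_quotes (text : String) : List String :=
  if PySem.Str.startswith text "'" || PySem.Str.startswith text "\"" then
    match text.toList with
    | [] => []  -- unreachable: startswith a one-char prefix is false on ""
    | q :: rest =>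
      match scanA q rest 1 with
      | none => PySem.Str.split₀Max text 1
      | some counter =>
        let key := remove_escapes (PySem.Str.strip (PySem.Str.slice text (some 1) (some (counter : Int))))
        let rest' := PySem.Str.strip (PySem.Str.slice text (some ((counter : Int) + 1)) none)
        let key := if key = "" then String.mk [q, q] else key
        ([key, rest'].filter (fun s => !(s == "")))
  else PySem.Str.split₀Max text 1

-- ===== PORT B =====
-- B's trailing-run length: len(seg) - len(seg.rstrip("\\")), the number of trailing
-- backslashes — ported by hand (exact: rstrip('\\') removes exactly the trailing backslashes).
def trailingBS (seg : List Char) : Nat := (seg.reverse.takeWhile (· == '\\')).length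

-- B's `for seg in segs[:-1]` loop: pos accumulates segment lengths plus the quote
-- separators; `some` = the quote after this segment closes (even trailing run).
def findCloseAux : List (List Char) → Nat → Option Nat
  | [], _ => none
  | [_], _ => none
  | seg :: s2 :: rest, pos =>
      if trailingBS seg % 2 == 0 then some (pos + seg.length)
      else findCloseAux (s2 :: rest) (pos + seg.length + 1)

-- B's while loop over segs[1:] of text.split("\\"): a nonempty segment is appended as is,
-- an empty one means an escaped backslash (emit '\' and consume the next segment),
-- a trailing empty one is a dangling backslash and is dropped.
def joinSegs : List (List Char) → List (List Char)
  | [] => []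
  | s :: rest =>
      if s.isEmpty then
        match rest with
        | [] => []
        | s2 :: rest' => ('\\' :: s2) :: joinSegs rest'
      else s :: joinSegs rest
termination_by segs => segs.length
decreasing_by all_goals (simp; try omega)

def remove_escapes_alt (text : String) : String :=
  match PySem.Chars.splitOn text.toList ['\\'] with
  | [] => ""  -- unreachable: str.split never returns an empty list
  | s0 :: rest => String.mk (s0 ++ (joinSegs rest).flatten)

def split_quotes_alt (text : String) : List String :=
  match text.toList with
  | [] => PySem.Str.split₀Max text 1
  | q :: rest =>
    if q = '\'' || q = '"' then
      match findCloseAux (PySem.Chars.splitOn rest [q]) 1 with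
      | none => PySem.Str.split₀Max text 1
      | some pos =>
        let k := remove_escapes_alt (PySem.Str.strip (PySem.Str.slice text (some 1) (some (pos : Int))))
        let key := if k = "" then String.mk [q, q] else k
        let rest' := PySem.Str.strip (PySem.Str.slice text (some ((pos : Int) + 1)) none)
        ([key, rest'].filter (fun s => !(s == "")))
    else PySem.Str.split₀Max text 1

-- ===== PRECONDITION & SPEC =====
def Spec_split_quotes (text : String) (out : List String) : Prop := out = split_quotes_alt text
instance (text : String) (out : List String) : Decidable (Spec_split_quotes text out) := by unfold Spec_split_quotes; infer_instance

-- ===== CLAIM (what is proved, stated in full; the proofs are below) =====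
def Claim_equal_split_quotes : Prop := ∀ (text : String), Dom_split_quotes text → Spec_split_quotes text (split_quotes text)

-- ===== LEMMAS AND PROOFS =====

-- proof-only helpers: a clean structural single-char split, the pairwise unescape,
-- the parity scan, and the backslash-run fold
def pySplitQ (q : Char) : List Char → List (List Char)
  | [] => [[]]
  | c :: rest =>
      if c = q then [] :: pySplitQ q rest
      else match pySplitQ q rest with
        | [] => [[c]]
        | s :: ss => (c :: s) :: ss

def pairRE : List Char → List Char
  | [] => []
  | c :: cs =>
      if c = '\\' then
        match cs with
        | [] => []
        | c2 :: cs' => c2 :: pairRE cs'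
      else c :: pairRE cs

def scanB (q : Char) : List Char → Nat → Nat → Option Nat
  | [], _, _ => none
  | c :: cs, i, bs =>
      if c = q && bs % 2 == 0 then some i
      else scanB q cs (i + 1) (if c = '\\' then bs + 1 else 0)

def runEnd (bs : Nat) : List Char → Nat
  | [] => bs
  | c :: cs => runEnd (if c = '\\' then bs + 1 else 0) cs

theorem pySplitQ_ne_nil (q : Char) (cs : List Char) : pySplitQ q cs ≠ [] := by
  cases cs with
  | nil => simp [pySplitQ]
  | cons c rest =>
    rw [pySplitQ.eq_def]
    by_cases h : c = q
    · simp [h]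
    · simp only [if_neg h]
      cases pySplitQ q rest <;> simp

def consHead (pre : List Char) : List (List Char) → List (List Char)
  | [] => [pre]
  | s :: ss => (pre ++ s) :: ss

theorem splitOn_go_spec (a : Char) :
    ∀ (l : List Char) (fuel : Nat), l.length < fuel →
    ∀ (cur : List Char) (acc : List (List Char)),
      PySem.Chars.splitOn.go [a] fuel l cur acc =
        acc.reverse ++ consHead cur.reverse (pySplitQ a l) := by
  intro l
  induction l with
  | nil =>
    intro fuel hf cur acc
    match fuel, hf with
    | fuel + 1, _ =>
      rw [PySem.Chars.splitOn.go]
      · simp [pySplitQ, consHead]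
      · omega
  | cons c rest ih =>
    intro fuel hf cur acc
    match fuel, hf with
    | fuel + 1, hf =>
      have hrest : rest.length < fuel := by simp at hf; omega
      rw [PySem.Chars.splitOn.go]
      by_cases hca : c = a
      · subst hca
        have hpre : [c].isPrefixOf (c :: rest) = true := by simp [List.isPrefixOf]
        rw [if_pos hpre]
        simp only [List.length_nil, List.length_cons, List.drop_succ_cons, List.drop_zero]
        rw [ih fuel hrest [] (cur.reverse :: acc)]
        have e1 : pySplitQ c (c :: rest) = [] :: pySplitQ c rest := by
          simp [pySplitQ]
        rw [e1]
        cases hps : pySplitQ c rest with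
        | nil => exact absurd hps (pySplitQ_ne_nil _ _)
        | cons s ss => simp [consHead]
      · have hpre : [a].isPrefixOf (c :: rest) = false := by
          simp [List.isPrefixOf]
          exact fun h => hca h.symm
        rw [if_neg (by simp [hpre])]
        rw [ih fuel hrest (c :: cur) acc]
        have e1 : pySplitQ a (c :: rest) =
            (match pySplitQ a rest with
             | [] => [[c]]
             | s :: ss => (c :: s) :: ss) := by
          rw [pySplitQ.eq_def]; simp [hca]
        rw [e1]
        cases hps : pySplitQ a rest with
        | nil => exact absurd hps (pySplitQ_ne_nil _ _)
        | cons s ss => simp [consHead]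

theorem splitOn_eq_pySplitQ (q : Char) (cs : List Char) :
    PySem.Chars.splitOn cs [q] = pySplitQ q cs := by
  unfold PySem.Chars.splitOn
  rw [splitOn_go_spec q cs (cs.length + 1) (by omega) [] []]
  cases hps : pySplitQ q cs with
  | nil => exact absurd hps (pySplitQ_ne_nil _ _)
  | cons s ss => simp [consHead]

theorem scanB_eq_scanA (q : Char) (hq : q ≠ '\\') :
    ∀ (cs : List Char) (i bs : Nat),
      scanB q cs i bs =
        if bs % 2 = 0 then scanA q cs i
        else (match cs with | [] => none | _ :: cs' => scanA q cs' (i + 1)) := by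
  intro cs
  induction cs with
  | nil => intro i bs; by_cases hb : bs % 2 = 0 <;> simp [scanB, scanA, hb]
  | cons c cs ih =>
    intro i bs
    by_cases hb : bs % 2 = 0
    · rw [if_pos hb]
      by_cases hcq : c = q
      · have hcb : c ≠ '\\' := by rw [hcq]; exact hq
        simp [scanB, scanA, hcq, hq, hb]
      · by_cases hcb : c = '\\'
        · subst hcb
          have hqb : ('\\' == q) = false := by
            simp only [beq_eq_false_iff_ne, ne_eq]
            exact fun h => hq h.symm
          have hodd : ¬ (bs + 1) % 2 = 0 := by omega
          have e1 : scanB q ('\\' :: cs) i bs = scanB q cs (i + 1) (bs + 1) := by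
            simp [scanB, hcq]
          have e2 : scanA q ('\\' :: cs) i = scanA q (cs.drop 1) (i + 2) := by
            simp [scanA]
          rw [e1, e2, ih, if_neg hodd]
          cases cs with
          | nil => simp [scanA]
          | cons c2 cs' => rfl
        · have e1 : scanB q (c :: cs) i bs = scanB q cs (i + 1) 0 := by
            simp [scanB, hcq, hcb]
          have e2 : scanA q (c :: cs) i = scanA q cs (i + 1) := by
            simp [scanA, hcq, hcb]
          rw [e1, e2, ih]
          simp
    · have hb1 : bs % 2 = 1 := by omega
      have h2 : (if c = '\\' then bs + 1 else 0) % 2 = 0 := by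
        split <;> omega
      have e1 : scanB q (c :: cs) i bs = scanB q cs (i + 1) (if c = '\\' then bs + 1 else 0) := by
        simp [scanB, hb1]
      rw [e1, ih, if_pos h2, if_neg hb]

theorem length_takeWhile_eq_iff (p : Char → Bool) (l : List Char) :
    ((l.takeWhile p).length = l.length) ↔ l.all p := by
  constructor
  · intro h
    have he := (List.takeWhile_prefix (p := p) (l := l)).eq_of_length h
    rw [List.all_eq_true]
    exact List.takeWhile_eq_self_iff.mp he
  · intro h
    rw [List.takeWhile_eq_self_iff.mpr (by simpa [List.all_eq_true] using h)]

theorem runEnd_eq (bs : Nat) (seg : List Char) :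
    runEnd bs seg = if seg.all (· == '\\') then bs + seg.length else trailingBS seg := by
  induction seg generalizing bs with
  | nil => simp [runEnd]
  | cons c cs ih =>
    rw [runEnd, ih]
    by_cases hc : c = '\\'
    · subst hc
      by_cases hall : cs.all (· == '\\')
      · simp [hall, List.length_cons]; omega
      · have hall' : ¬ ('\\' :: cs).all (· == '\\') := by simp_all
        rw [if_neg hall, if_neg hall']
        unfold trailingBS
        rw [List.reverse_cons, List.takeWhile_append]
        have hne : ¬ (List.takeWhile (· == '\\') cs.reverse).length = cs.reverse.length := by
          rw [length_takeWhile_eq_iff]; simp_all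
        rw [if_neg hne]
    · have h1 : ¬ (c :: cs).all (· == '\\') := by simp [hc]
      rw [if_neg h1, if_neg hc]
      unfold trailingBS
      rw [List.reverse_cons, List.takeWhile_append]
      by_cases hall : cs.all (· == '\\')
      · have heq : (List.takeWhile (· == '\\') cs.reverse).length = cs.reverse.length := by
          rw [length_takeWhile_eq_iff]; simpa using hall
        rw [if_pos heq, if_pos hall]
        have hcb : ((c == '\\') = false) := by simpa using hc
        simp [List.takeWhile, hcb]
      · have hne : ¬ (List.takeWhile (· == '\\') cs.reverse).length = cs.reverse.length := by
          rw [length_takeWhile_eq_iff]; simp_all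
        rw [if_neg hne, if_neg hall]

theorem runEnd_zero (seg : List Char) : runEnd 0 seg = trailingBS seg := by
  rw [runEnd_eq]
  by_cases hall : seg.all (· == '\\')
  · rw [if_pos hall]
    unfold trailingBS
    have : seg.reverse.takeWhile (· == '\\') = seg.reverse := by
      rw [List.takeWhile_eq_self_iff]
      intro x hx
      exact List.all_eq_true.mp hall x (List.mem_reverse.mp hx)
    rw [this, List.length_reverse, Nat.zero_add]
  · rw [if_neg hall]

theorem scanB_seg (q : Char) (hq : q ≠ '\\') :
    ∀ (seg : List Char), q ∉ seg →
    ∀ (cs2 : List Char) (pos bs : Nat),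
      scanB q (seg ++ q :: cs2) pos bs =
        if runEnd bs seg % 2 = 0 then some (pos + seg.length)
        else scanB q cs2 (pos + seg.length + 1) 0 := by
  intro seg
  induction seg with
  | nil =>
    intro _ cs2 pos bs
    have hq' : ¬ q = '\\' := hq
    by_cases hb : bs % 2 = 0 <;> simp [scanB, runEnd, hb, hq']
  | cons c seg' ih =>
    intro hmem cs2 pos bs
    have hcq : ¬ (c = q) := fun h => hmem (by simp [h])
    have hcq' : ((c == q) = false) := by simpa using hcq
    have hmem' : q ∉ seg' := fun h => hmem (List.mem_cons_of_mem _ h)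
    have e1 : scanB q ((c :: seg') ++ q :: cs2) pos bs =
        scanB q (seg' ++ q :: cs2) (pos + 1) (if c = '\\' then bs + 1 else 0) := by
      simp [scanB, hcq]
    rw [e1, ih hmem']
    have e2 : runEnd bs (c :: seg') = runEnd (if c = '\\' then bs + 1 else 0) seg' := rfl
    rw [e2]
    have e3 : pos + 1 + seg'.length = pos + (c :: seg').length := by simp; omega
    rw [e3]

theorem scanB_none (q : Char) : ∀ (cs : List Char), q ∉ cs →
    ∀ (pos bs : Nat), scanB q cs pos bs = none := by
  intro cs
  induction cs with
  | nil => intro _ _ _; rfl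
  | cons c cs ih =>
    intro hmem pos bs
    have hcq : ¬ c = q := fun h => hmem (by simp [h])
    have : scanB q (c :: cs) pos bs = scanB q cs (pos + 1) (if c = '\\' then bs + 1 else 0) := by
      simp [scanB, hcq]
    rw [this, ih (fun h => hmem (List.mem_cons_of_mem _ h))]

theorem pySplitQ_no_q (q : Char) : ∀ (cs : List Char), q ∉ cs → pySplitQ q cs = [cs] := by
  intro cs
  induction cs with
  | nil => intro _; rfl
  | cons c cs ih =>
    intro hmem
    have hcq : ¬ (c = q) := fun h => hmem (by simp [h])
    rw [pySplitQ.eq_def]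
    simp only [if_neg hcq]
    rw [ih (fun h => hmem (List.mem_cons_of_mem _ h))]

theorem pySplitQ_append (q : Char) : ∀ (s0 : List Char), q ∉ s0 →
    ∀ (cs2 : List Char), pySplitQ q (s0 ++ q :: cs2) = s0 :: pySplitQ q cs2 := by
  intro s0
  induction s0 with
  | nil => intro _ cs2; simp [pySplitQ]
  | cons c s0' ih =>
    intro hmem cs2
    have hcq : ¬ (c = q) := fun h => hmem (by simp [h])
    rw [List.cons_append, pySplitQ.eq_def]
    simp only [if_neg hcq]
    rw [ih (fun h => hmem (List.mem_cons_of_mem _ h))]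

theorem findCloseAux_eq_scanB (q : Char) (hq : q ≠ '\\') :
    ∀ (cs : List Char) (pos : Nat),
      findCloseAux (pySplitQ q cs) pos = scanB q cs pos 0 := by
  intro cs
  induction hn : cs.length using Nat.strong_induction_on generalizing cs with
  | _ n ih =>
    intro pos
    by_cases hmem : q ∈ cs
    · -- cs = seg ++ q :: cs2, q ∉ seg
      have hsplit := List.takeWhile_append_dropWhile (p := fun c => c != q) (l := cs)
      have hd_ne : cs.dropWhile (fun c => c != q) ≠ [] := by
        intro h
        have hall := List.dropWhile_eq_nil_iff.mp h
        have := hall q hmem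
        simp at this
      obtain ⟨c, cs2, hd⟩ := List.exists_cons_of_ne_nil hd_ne
      have hcq : c = q := by
        have h2 := List.head_dropWhile_not (p := fun c => c != q) (l := cs) hd_ne
        simp only [hd] at h2
        simpa using h2
      have hseg_mem : q ∉ cs.takeWhile (fun c => c != q) := by
        intro h
        have := List.mem_takeWhile_imp h
        simp at this
      have hcs : cs = cs.takeWhile (fun c => c != q) ++ q :: cs2 := by
        conv_lhs => rw [← hsplit]
        rw [hd, hcq]
      set seg := cs.takeWhile (fun c => c != q) with hsegdef
      rw [hcs, pySplitQ_append q seg hseg_mem, scanB_seg q hq seg hseg_mem]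
      have hlt : cs2.length < n := by
        rw [← hn, hcs]; simp; omega
      cases hps : pySplitQ q cs2 with
      | nil => exact absurd hps (pySplitQ_ne_nil _ _)
      | cons t ts =>
        rw [findCloseAux]
        rw [runEnd_zero]
        by_cases hpar : trailingBS seg % 2 = 0
        · simp [hpar]
        · have : (trailingBS seg % 2 == 0) = false := by simpa using hpar
          rw [if_neg hpar, this, if_neg (by simp)]
          have := ih cs2.length hlt cs2 rfl (pos + seg.length + 1)
          rw [hps] at this
          exact this
    · rw [pySplitQ_no_q q cs hmem, scanB_none q cs hmem]
      rfl

def bRE (cs : List Char) : List Char :=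
  match pySplitQ '\\' cs with
  | [] => []
  | s0 :: rest => s0 ++ (joinSegs rest).flatten

theorem bRE_eq {cs : List Char} {s0 : List Char} {rest : List (List Char)}
    (h : pySplitQ '\\' cs = s0 :: rest) : bRE cs = s0 ++ (joinSegs rest).flatten := by
  unfold bRE; rw [h]

theorem joinSegs_pairRE : ∀ (cs : List Char), bRE cs = pairRE cs := by
  intro cs
  induction hn : cs.length using Nat.strong_induction_on generalizing cs with
  | _ n ih =>
    match cs with
    | [] => simp [bRE, pySplitQ, joinSegs, pairRE]
    | c :: cs' =>
      by_cases hc : c = '\\'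
      · subst hc
        have e0 : pySplitQ '\\' ('\\' :: cs') = [] :: pySplitQ '\\' cs' := by
          simp [pySplitQ]
        match cs' with
        | [] => simp [bRE, pySplitQ, joinSegs, pairRE]
        | c2 :: cs3 =>
          by_cases hc2 : c2 = '\\'
          · subst hc2
            have e1 : pySplitQ '\\' ('\\' :: cs3) = [] :: pySplitQ '\\' cs3 := by
              simp [pySplitQ]
            cases hps : pySplitQ '\\' cs3 with
            | nil => exact absurd hps (pySplitQ_ne_nil _ _)
            | cons t ts =>
              rw [bRE_eq (by rw [e0, e1, hps])]
              have e2 : joinSegs ([] :: t :: ts) = ('\\' :: t) :: joinSegs ts := by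
                rw [joinSegs.eq_def]; try simp
              have ihc := ih cs3.length (by simp [← hn]; try omega) cs3 rfl
              have ht : t ++ (joinSegs ts).flatten = pairRE cs3 := by
                rw [← bRE_eq hps]; exact ihc
              have e3 : pairRE ('\\' :: '\\' :: cs3) = '\\' :: pairRE cs3 := by
                simp [pairRE]
              rw [e2, e3]
              simp [ht]
          · have e1 : pySplitQ '\\' (c2 :: cs3) =
                (match pySplitQ '\\' cs3 with
                 | [] => [[c2]]
                 | s :: ss => (c2 :: s) :: ss) := by
              rw [pySplitQ.eq_def]; simp [hc2]
            cases hps : pySplitQ '\\' cs3 with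
            | nil => exact absurd hps (pySplitQ_ne_nil _ _)
            | cons t ts =>
              rw [hps] at e1
              rw [bRE_eq (by rw [e0, e1])]
              have e2 : joinSegs ((c2 :: t) :: ts) = (c2 :: t) :: joinSegs ts := by
                rw [joinSegs.eq_def]; try simp
              have ihc := ih cs3.length (by simp [← hn]; try omega) cs3 rfl
              have ht : t ++ (joinSegs ts).flatten = pairRE cs3 := by
                rw [← bRE_eq hps]; exact ihc
              have e3 : pairRE ('\\' :: c2 :: cs3) = c2 :: pairRE cs3 := by
                simp [pairRE]
              rw [e2, e3]
              simp [ht]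
      · have e1 : pySplitQ '\\' (c :: cs') =
            (match pySplitQ '\\' cs' with
             | [] => [[c]]
             | s :: ss => (c :: s) :: ss) := by
          rw [pySplitQ.eq_def]; simp [hc]
        cases hps : pySplitQ '\\' cs' with
        | nil => exact absurd hps (pySplitQ_ne_nil _ _)
        | cons t ts =>
          rw [hps] at e1
          rw [bRE_eq e1]
          have ihc := ih cs'.length (by simp [← hn]) cs' rfl
          have e3 : pairRE (c :: cs') = c :: pairRE cs' := by
            rw [pairRE.eq_def]; simp [hc]
          rw [bRE_eq hps] at ihc
          rw [e3]
          simp [ihc]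

theorem removeEscapes_fold (cs : List Char) :
    ∀ (acc : List Char) (b : Bool),
      (cs.foldl removeEscapesStepA (acc, b)).1 =
        acc ++ (if b then (match cs with | [] => [] | c :: cs' => c :: pairRE cs')
                else pairRE cs) := by
  induction cs with
  | nil => intro acc b; cases b <;> simp [pairRE]
  | cons c cs ih =>
    intro acc b
    cases b with
    | true =>
      have e1 : removeEscapesStepA (acc, true) c = (acc ++ [c], false) := rfl
      simp only [List.foldl_cons, e1]
      rw [ih]
      simp
    | false =>
      by_cases hc : c = '\\'
      · subst hc
        have e1 : removeEscapesStepA (acc, false) '\\' = (acc, true) := by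
          simp [removeEscapesStepA]
        simp only [List.foldl_cons, e1]
        rw [ih]
        cases cs with
        | nil => simp [pairRE]
        | cons c2 cs' =>
          have e2 : pairRE ('\\' :: c2 :: cs') = c2 :: pairRE cs' := by
            simp [pairRE]
          simp [e2]
      · have e1 : removeEscapesStepA (acc, false) c = (acc ++ [c], false) := by
          simp [removeEscapesStepA, hc]
        have e2 : pairRE (c :: cs) = c :: pairRE cs := by
          rw [pairRE.eq_def]; simp [hc]
        simp only [List.foldl_cons, e1]
        rw [ih]
        simp [e2]

theorem remove_escapes_eq (s : String) :
    remove_escapes s = remove_escapes_alt s := by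
  unfold remove_escapes remove_escapes_alt
  rw [removeEscapes_fold s.toList [] false, splitOn_eq_pySplitQ]
  have h := joinSegs_pairRE s.toList
  cases hps : pySplitQ '\\' s.toList with
  | nil => exact absurd hps (pySplitQ_ne_nil _ _)
  | cons s0 rest =>
    rw [bRE_eq hps] at h
    simp [h]

theorem findCloseAux_eq_scanA (q : Char) (hq : q ≠ '\\') (cs : List Char) :
    findCloseAux (pySplitQ q cs) 1 = scanA q cs 1 := by
  rw [findCloseAux_eq_scanB q hq, scanB_eq_scanA q hq]
  simp

-- ===== VERDICT (by name: the statement is the Claim_ definition above) =====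
theorem split_quotes_spec : Claim_equal_split_quotes := by
  intro text _
  unfold Spec_split_quotes split_quotes split_quotes_alt
  have e1 : ("'" : String).toList = ['\''] := rfl
  have e2 : ("\"" : String).toList = ['"'] := rfl
  cases htl : text.toList with
  | nil =>
    have c1 : PySem.Chars.startswith text.toList ['\''] = false := by
      rw [Bool.eq_false_iff, ne_eq, PySem.Chars.startswith_iff, htl]; simp
    have c2 : PySem.Chars.startswith text.toList ['"'] = false := by
      rw [Bool.eq_false_iff, ne_eq, PySem.Chars.startswith_iff, htl]; simp
    simp [e1, e2, c1, c2]
  | cons q rest =>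
    by_cases hq : q = '\'' ∨ q = '"'
    · have hqb : q ≠ '\\' := by rcases hq with h | h <;> (rw [h]; decide)
      have hscan : findCloseAux (PySem.Chars.splitOn rest [q]) 1 = scanA q rest 1 := by
        rw [splitOn_eq_pySplitQ]; exact findCloseAux_eq_scanA q hqb rest
      rcases hq with h | h
      · have ct : PySem.Chars.startswith text.toList ['\''] = true := by
          rw [PySem.Chars.startswith_iff, htl, h]; exact ⟨rest, rfl⟩
        have hcond2 : (q = '\'' || q = '"') = true := by simp [h]
        cases hsc : scanA q rest 1 with
        | none => simp [e1, e2, ct, hcond2, hscan, hsc]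
        | some counter => simp [e1, e2, ct, hcond2, hscan, hsc, remove_escapes_eq]
      · have ct : PySem.Chars.startswith text.toList ['"'] = true := by
          rw [PySem.Chars.startswith_iff, htl, h]; exact ⟨rest, rfl⟩
        have hcond2 : (q = '\'' || q = '"') = true := by simp [h]
        cases hsc : scanA q rest 1 with
        | none => simp [e1, e2, ct, hcond2, hscan, hsc]
        | some counter => simp [e1, e2, ct, hcond2, hscan, hsc, remove_escapes_eq]
    · have h1' : q ≠ '\'' := fun h => hq (Or.inl h)
      have h2' : q ≠ '"' := fun h => hq (Or.inr h)
      have c1 : PySem.Chars.startswith text.toList ['\''] = false := by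
        rw [Bool.eq_false_iff, ne_eq, PySem.Chars.startswith_iff, htl]
        simp [List.cons_prefix_cons, Ne.symm h1']
      have c2 : PySem.Chars.startswith text.toList ['"'] = false := by
        rw [Bool.eq_false_iff, ne_eq, PySem.Chars.startswith_iff, htl]
        simp [List.cons_prefix_cons, Ne.symm h2']
      have hcond2 : (q = '\'' || q = '"') = false := by
        simp [h1', h2']
      simp [e1, e2, c1, c2, hcond2]
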